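-- pv_equiv track=rewrite | github.com/TianjinAI/hermes-portals | bloomberg-portal/intelligence_generator.py | get_recent_newsletters
-- ===== SOURCE A (Python) =====
-- def get_recent_newsletters(summaries):
--     """Get list of recent newsletters."""
--     newsletters = []
--
--     for summary in summaries:
--         date = summary.get('date', '')
--         headline = summary.get('headline', 'Untitled')
--         category = summary.get('category', 'Bloomberg')
--
--         newsletters.append({
--             'title': headline,
--             'date': date,
--             'source': 'Bloomberg',
--             'category': category
--         })
--
--     # Sort by date, most recent first
--     newsletters.sort(key=lambda x: x['date'], reverse=True)
--
--     return newsletters[:20]  # Last 20 newsletters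
-- ===== SOURCE B (Python) =====
-- def get_recent_newsletters(summaries):
--     """Get list of recent newsletters."""
--     # Single pass: maintain a bounded (<= 20) date-descending, stable top list
--     # instead of building and sorting the whole list.
--     top = []
--     for summary in summaries:
--         row = {
--             'title': summary.get('headline', 'Untitled'),
--             'date': summary.get('date', ''),
--             'source': 'Bloomberg',
--             'category': summary.get('category', 'Bloomberg')
--         }
--         i = 0
--         while i < len(top) and top[i]['date'] >= row['date']:
--             i += 1
--         top.insert(i, row)
--         del top[20:]
--     return top
-- ===== Notes on version B (the rewrite author's own statement) =====
-- stated objective: alternative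
-- what changed: B replaces build-all + stable reverse sort + slice by a single pass that inserts each row into a bounded (at most 20) date-descending list, truncating after every insertion; no full sort is ever performed.
import Mathlib
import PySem

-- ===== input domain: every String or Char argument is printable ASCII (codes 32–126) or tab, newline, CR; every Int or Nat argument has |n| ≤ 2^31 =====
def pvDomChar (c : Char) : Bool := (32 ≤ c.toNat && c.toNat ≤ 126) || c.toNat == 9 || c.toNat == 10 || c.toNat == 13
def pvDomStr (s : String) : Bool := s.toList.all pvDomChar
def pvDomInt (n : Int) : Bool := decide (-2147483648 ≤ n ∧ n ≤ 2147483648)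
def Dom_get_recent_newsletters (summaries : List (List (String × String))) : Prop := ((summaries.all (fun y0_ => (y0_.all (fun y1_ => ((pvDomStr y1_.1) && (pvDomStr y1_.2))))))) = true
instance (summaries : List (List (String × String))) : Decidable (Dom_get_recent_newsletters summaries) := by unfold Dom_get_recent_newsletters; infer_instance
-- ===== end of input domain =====

-- B replaces build-all + stable reverse sort + slice by a single pass keeping a
-- bounded (≤ 20) date-descending list; same output, no full sort (objective: alternative).

-- Python dict.get(k, dflt) on an association list: first match, else default (exact).
def pvGetD (xs : List (String × String)) (k dflt : String) : String :=
  match xs with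
  | [] => dflt
  | (a, b) :: t => if a = k then b else pvGetD t k dflt

-- the newsletter row both Pythons build for one summary (keys in dict-literal order)
def pvRow (summary : List (String × String)) : List (String × String) :=
  [("title", pvGetD summary "headline" "Untitled"),
   ("date", pvGetD summary "date" ""),
   ("source", "Bloomberg"),
   ("category", pvGetD summary "category" "Bloomberg")]

-- ===== PORT A =====
-- loop appending rows; then newsletters.sort(key=lambda x: x['date'], reverse=True); then [:20].
-- x['date'] is exact as pvGetD: every row built above contains the key "date".
def get_recent_newsletters (summaries : List (List (String × String))) : List (List (String × String)) :=
  let newsletters := summaries.foldl (fun acc s => acc ++ [pvRow s]) []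
  (PySem.List.sorted newsletters (fun x => pvGetD x "date" "") true).take 20

-- ===== PORT B =====
-- the while-loop + list.insert of Source B: insert row before the first entry whose date is < row's date
def insertDesc (row : List (String × String)) : List (List (String × String)) → List (List (String × String))
  | [] => [row]
  | y :: t => if pvGetD y "date" "" < pvGetD row "date" "" then row :: y :: t else y :: insertDesc row t

-- one pass: insert each row into the bounded top list, 'del top[20:]' = take 20
def get_recent_newsletters_alt (summaries : List (List (String × String))) : List (List (String × String)) :=
  summaries.foldl (fun top s => (insertDesc (pvRow s) top).take 20) []

-- ===== PRECONDITION & SPEC =====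
def Spec_get_recent_newsletters (summaries : List (List (String × String))) (out : List (List (String × String))) : Prop := out = get_recent_newsletters_alt summaries
instance (summaries : List (List (String × String))) (out : List (List (String × String))) : Decidable (Spec_get_recent_newsletters summaries out) := by unfold Spec_get_recent_newsletters; infer_instance

-- ===== CLAIM (what is proved, stated in full; the proofs are below) =====
def Claim_equal_get_recent_newsletters : Prop := ∀ (summaries : List (List (String × String))), Dom_get_recent_newsletters summaries → Spec_get_recent_newsletters summaries (get_recent_newsletters summaries)

-- ===== LEMMAS AND PROOFS =====

-- Source B's insertion is PySem's insertBy with the reverse-sort predicate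
theorem insertDesc_eq_insertBy (r : List (String × String)) (ys : List (List (String × String))) :
    insertDesc r ys =
      PySem.List.insertBy (fun a b => decide (pvGetD b "date" "" < pvGetD a "date" "")) r ys := by
  induction ys with
  | nil => rfl
  | cons y t ih => simp [insertDesc, PySem.List.insertBy, ih]

theorem take_cons_take (m : Nat) (y : List (String × String)) (t : List (List (String × String))) :
    (y :: t.take m).take m = (y :: t).take m := by
  cases m with
  | zero => simp
  | succ k => simp [List.take_take]

theorem take_insertDesc_take (n : Nat) (x : List (String × String)) (ys : List (List (String × String))) :
    (insertDesc x (ys.take n)).take n = (insertDesc x ys).take n := by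
  induction ys generalizing n with
  | nil => simp
  | cons y t ih =>
    cases n with
    | zero => simp
    | succ m =>
      simp only [List.take_succ_cons, insertDesc]
      split_ifs with h
      · simp only [List.take_succ_cons, take_cons_take m y t]
      · simp [List.take_succ_cons, ih m]

theorem foldl_take_insert (xs : List (List (String × String))) (ys : List (List (String × String))) :
    xs.foldl (fun top s => (insertDesc (pvRow s) top).take 20) (ys.take 20) =
      (xs.foldl (fun top s => insertDesc (pvRow s) top) ys).take 20 := by
  induction xs generalizing ys with
  | nil => rfl
  | cons x t ih =>
    simp only [List.foldl_cons]
    rw [take_insertDesc_take, ih]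

theorem foldl_append_map (xs : List (List (String × String))) (a : List (List (String × String))) :
    xs.foldl (fun acc s => acc ++ [pvRow s]) a = a ++ xs.map pvRow := by
  induction xs generalizing a with
  | nil => simp
  | cons x t ih => simp [ih]

-- ===== VERDICT (by name: the statement is the Claim_ definition above) =====
theorem get_recent_newsletters_spec : Claim_equal_get_recent_newsletters := by
  intro summaries _
  show get_recent_newsletters summaries = get_recent_newsletters_alt summaries
  unfold get_recent_newsletters get_recent_newsletters_alt
  rw [foldl_append_map, List.nil_append]
  show (PySem.List.sorted (summaries.map pvRow) (fun x => pvGetD x "date" "") true).take 20 = _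
  rw [
    PySem.List.sorted_rev_eq_foldl_insertBy (summaries.map pvRow) (fun x => pvGetD x "date" ""),
    List.foldl_map]
  have : summaries.foldl (fun top s => (insertDesc (pvRow s) top).take 20) [] =
      summaries.foldl (fun top s => (insertDesc (pvRow s) top).take 20) (List.take 20 []) := rfl
  rw [this, foldl_take_insert]
  simp [insertDesc_eq_insertBy]
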